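-- pv_equiv track=rewrite | github.com/PavinWu/UNI_FIT2004 | 2LabWork-FIT2004/Week12_assessed/decompressor.py | createRank
-- ===== SOURCE A (Python) =====
-- def createRank(occurence):	# O(M)
-- 	rank = [-1]*256	# assume M = 256 = const
-- 	i = 0
-- 	Index1stCol = 0	# Index in 1st col for next char
-- 	for i in range(len(occurence)):
-- 		if occurence[i] != 0:
-- 			rank[i] = Index1stCol
-- 			Index1stCol = rank[i] + occurence[i]
-- 	return rank
--
-- 	"""
-- 	prevChar = bwtSorted[0]
-- 	count = 0
-- 	for char in bwtSorted:	# create rank array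
-- 		if char == prevChar:
-- 			count += 1
-- 		else:
-- 			rank.append([prevChar, count])
-- 			prevChar = char
-- 			count = 1
-- 	rank.append([prevChar, count])
-- 	return rank
-- 	"""
-- ===== SOURCE B (Python) =====
-- def createRank(occurence):
--     # Pass 1: cumulative-offset table; prefix[i] = sum of occurence[0..i-1]
--     prefix = [0]
--     for x in occurence:
--         prefix.append(prefix[-1] + x)
--     # Pass 2: assign offsets where the count is nonzero, -1 elsewhere
--     rank = []
--     for i in range(256):
--         if i < len(occurence) and occurence[i] != 0:
--             rank.append(prefix[i])
--         else:
--             rank.append(-1)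
--     return rank
-- ===== Notes on version B (the rewrite author's own statement) =====
-- stated objective: alternative
-- what changed: B replaces A's single stateful accumulator loop that writes into a preallocated 256-slot array by two passes: it first materializes a cumulative prefix-sum table of occurence, then builds the 256-entry rank list front-to-back by mapping each index to its prefix sum (nonzero count) or -1.
import Mathlib
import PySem

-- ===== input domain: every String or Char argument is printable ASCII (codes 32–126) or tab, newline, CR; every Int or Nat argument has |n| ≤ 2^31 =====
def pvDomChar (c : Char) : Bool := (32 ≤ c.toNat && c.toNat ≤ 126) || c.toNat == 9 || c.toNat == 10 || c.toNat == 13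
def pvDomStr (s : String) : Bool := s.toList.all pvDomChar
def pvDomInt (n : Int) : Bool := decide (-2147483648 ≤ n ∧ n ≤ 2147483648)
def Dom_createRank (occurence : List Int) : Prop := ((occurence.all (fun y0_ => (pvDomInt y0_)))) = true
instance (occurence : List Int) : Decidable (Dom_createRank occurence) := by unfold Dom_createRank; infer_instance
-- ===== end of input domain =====

set_option maxRecDepth 40000


-- B replaces A's single stateful-accumulator loop over a preallocated array by a
-- prefix-sum table pass plus a front-to-back assignment pass (objective: alternative).

-- ===== PORT A =====
-- helper: the pairs (i, occurence[i]) visited by A's `for i in range(len(occurence))`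
def pvEnumFrom (k : Nat) : List Int → List (Nat × Int)
  | [] => []
  | x :: rest => (k, x) :: pvEnumFrom (k + 1) rest

-- A's loop; `rank[i] = Index1stCol` is List.set (exact wherever Python does not raise:
-- on inputs admitted by Pre_ every written index is < 256 = rank.length)
def createRankLoop : List (Nat × Int) → List Int → Int → List Int
  | [], rank, _ => rank
  | (i, x) :: rest, rank, idx =>
    if x ≠ 0 then createRankLoop rest (rank.set i idx) (idx + x)
    else createRankLoop rest rank idx

def createRank (occurence : List Int) : List Int :=
  createRankLoop (pvEnumFrom 0 occurence) (List.replicate 256 (-1)) 0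

-- ===== PORT B =====
-- pass 1 of B: the running prefix sums appended after the initial 0
def pvPrefixGo : List Int → Int → List Int
  | [], _ => []
  | x :: rest, acc => (acc + x) :: pvPrefixGo rest (acc + x)

def createRank_alt (occurence : List Int) : List Int :=
  let ptable := 0 :: pvPrefixGo occurence 0
  (List.range 256).map (fun i =>
    if i < occurence.length ∧ occurence.getD i 0 ≠ 0 then ptable.getD i 0 else -1)

-- ===== PRECONDITION & SPEC =====
-- Pre_ excludes exactly the inputs on which Python A raises IndexError:
-- a nonzero count at some index ≥ 256 makes A execute rank[i] out of range.
def Pre_createRank (occurence : List Int) : Prop :=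
  ∀ x ∈ occurence.drop 256, x = 0
instance (occurence : List Int) : Decidable (Pre_createRank occurence) := by
  unfold Pre_createRank; infer_instance

def pvWitness_createRank : List Int := [2, 0, 1]

def Spec_createRank (occurence : List Int) (out : List Int) : Prop := out = createRank_alt occurence
instance (occurence : List Int) (out : List Int) : Decidable (Spec_createRank occurence out) := by unfold Spec_createRank; infer_instance

-- ===== CLAIM (what is proved, stated in full; the proofs are below) =====
def Claim_equal_createRank : Prop := ∀ (occurence : List Int), Dom_createRank occurence → Pre_createRank occurence → Spec_createRank occurence (createRank occurence)

-- ===== LEMMAS AND PROOFS =====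

theorem createRankLoop_length (l : List (Nat × Int)) (rank : List Int) (idx : Int) :
    (createRankLoop l rank idx).length = rank.length := by
  induction l generalizing rank idx with
  | nil => rfl
  | cons p rest ih =>
    obtain ⟨i, x⟩ := p
    simp only [createRankLoop]
    split
    · rw [ih, List.length_set]
    · exact ih rank idx

theorem createRankLoop_getD (occ : List Int) (k : Nat) (rank : List Int) (idx : Int) (j : Nat) :
    (createRankLoop (pvEnumFrom k occ) rank idx).getD j 0 =
      if k ≤ j ∧ j - k < occ.length ∧ occ.getD (j - k) 0 ≠ 0 ∧ j < rank.length
      then idx + (occ.take (j - k)).sum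
      else rank.getD j 0 := by
  induction occ generalizing k rank idx with
  | nil =>
    simp [pvEnumFrom, createRankLoop]
  | cons x rest ih =>
    simp only [pvEnumFrom, createRankLoop]
    by_cases hx : x = 0
    · subst hx
      rw [if_neg (by simp), ih]
      rcases Nat.lt_trichotomy j k with h | h | h
      · rw [if_neg (by omega), if_neg (by omega)]
      · subst h
        rw [if_neg (by omega), if_neg (by simp)]
      · have h1 : j - k = (j - (k + 1)) + 1 := by omega
        have h2 : ((0 : Int) :: rest).getD (j - k) 0 = rest.getD (j - (k + 1)) 0 := by
          rw [h1]; rfl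
        have h3 : (((0 : Int) :: rest).take (j - k)).sum = (rest.take (j - (k + 1))).sum := by
          rw [h1]; simp
        by_cases hc : k + 1 ≤ j ∧ j - (k + 1) < rest.length ∧
            rest.getD (j - (k + 1)) 0 ≠ 0 ∧ j < rank.length
        · rw [if_pos hc, if_pos ⟨by omega, by simp; omega,
            by rw [h2]; exact hc.2.2.1, hc.2.2.2⟩, h3]
        · rw [if_neg hc, if_neg (fun hc2 => hc ⟨by omega,
            by have := hc2.2.1; simp at this; omega,
            by rw [← h2]; exact hc2.2.2.1, hc2.2.2.2⟩)]
    · rw [if_pos hx, ih]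
      rcases Nat.lt_trichotomy j k with h | h | h
      · rw [if_neg (by omega), if_neg (by omega),
          List.getD_eq_getElem?_getD, List.getElem?_set_ne (by omega),
          ← List.getD_eq_getElem?_getD]
      · subst h
        rw [if_neg (by omega)]
        by_cases hk : j < rank.length
        · rw [if_pos ⟨le_refl j, by simp, by simpa using hx, hk⟩]
          simp [List.getD_eq_getElem?_getD, hk]
        · rw [if_neg (fun hc2 => hk hc2.2.2.2)]
          simp [List.getD_eq_getElem?_getD, hk]
      · have h1 : j - k = (j - (k + 1)) + 1 := by omega
        have h2 : (x :: rest).getD (j - k) 0 = rest.getD (j - (k + 1)) 0 := by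
          rw [h1]; rfl
        have h3 : ((x :: rest).take (j - k)).sum = x + (rest.take (j - (k + 1))).sum := by
          rw [h1]; simp
        have hsetj : (rank.set k idx).getD j 0 = rank.getD j 0 := by
          rw [List.getD_eq_getElem?_getD, List.getElem?_set_ne (by omega),
            ← List.getD_eq_getElem?_getD]
        by_cases hc : k + 1 ≤ j ∧ j - (k + 1) < rest.length ∧
            rest.getD (j - (k + 1)) 0 ≠ 0 ∧ j < (rank.set k idx).length
        · rw [if_pos hc, if_pos ⟨by omega, by simp; omega,
            by rw [h2]; exact hc.2.2.1, by simpa using hc.2.2.2⟩, h3]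
          ring
        · rw [if_neg hc, if_neg (fun hc2 => hc ⟨by omega,
            by have := hc2.2.1; simp at this; omega,
            by rw [← h2]; exact hc2.2.2.1, by simpa using hc2.2.2.2⟩), hsetj]

theorem pvPrefixGo_getD (occ : List Int) (c : Int) (j : Nat) (h : j < occ.length) :
    (pvPrefixGo occ c).getD j 0 = c + (occ.take (j + 1)).sum := by
  induction occ generalizing c j with
  | nil => simp at h
  | cons x rest ih =>
    cases j with
    | zero => simp [pvPrefixGo]
    | succ m =>
      simp only [pvPrefixGo, List.getD_cons_succ]
      rw [ih (c + x) m (by simpa using h)]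
      simp; ring

theorem prefix_getD (occ : List Int) (j : Nat) (h : j ≤ occ.length) :
    (0 :: pvPrefixGo occ 0).getD j 0 = (occ.take j).sum := by
  cases j with
  | zero => simp
  | succ m =>
    simp only [List.getD_cons_succ]
    rw [pvPrefixGo_getD occ 0 m (by omega)]
    simp

theorem createRank_alt_getD (occ : List Int) (j : Nat) (hj : j < 256) :
    (createRank_alt occ).getD j 0 =
      if j < occ.length ∧ occ.getD j 0 ≠ 0 then (occ.take j).sum else -1 := by
  unfold createRank_alt
  simp only []
  rw [List.getD_eq_getElem?_getD, List.getElem?_map, List.getElem?_range hj]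
  simp only [Option.map_some, Option.getD_some]
  split
  · next h => exact prefix_getD occ j (le_of_lt h.1)
  · rfl

theorem createRank_getD (occ : List Int) (j : Nat) (hj : j < 256) :
    (createRank occ).getD j 0 =
      if j < occ.length ∧ occ.getD j 0 ≠ 0 then (occ.take j).sum else -1 := by
  unfold createRank
  rw [createRankLoop_getD occ 0 (List.replicate 256 (-1)) 0 j]
  simp only [Nat.sub_zero, List.length_replicate, Nat.zero_le, true_and]
  by_cases hc : j < occ.length ∧ occ.getD j 0 ≠ 0
  · rw [if_pos ⟨hc.1, hc.2, hj⟩, if_pos hc]; ring_nf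
  · rw [if_neg (by intro h; exact hc ⟨h.1, h.2.1⟩), if_neg hc]
    rw [List.getD_eq_getElem?_getD, List.getElem?_replicate, if_pos hj]
    rfl

-- ===== VERDICT (by name: the statement is the Claim_ definition above) =====
theorem createRank_spec : Claim_equal_createRank := by
  intro occ _ _
  unfold Spec_createRank
  have hlenA : (createRank occ).length = 256 := by
    unfold createRank
    rw [createRankLoop_length]; simp
  have hlenB : (createRank_alt occ).length = 256 := by
    unfold createRank_alt; simp
  apply List.ext_getElem (by rw [hlenA, hlenB])
  intro j h1 h2
  have hj : j < 256 := by omega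
  have := (createRank_getD occ j hj).trans (createRank_alt_getD occ j hj).symm
  rwa [List.getD_eq_getElem?_getD, List.getD_eq_getElem?_getD,
    List.getElem?_eq_getElem h1, List.getElem?_eq_getElem h2] at this
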